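-- pv_equiv track=rewrite | github.com/Prashant-Dwivedi-08-01/DSA | stack/code/delete_middle_element.py | solve
-- ===== SOURCE A (Python) =====
-- def solve(stack, k):
--     if k == 1:
--         delted_ele =  stack[len(stack) -1]
--         stack.pop()
--         return delted_ele
--     else:
--         temp = stack.pop()
--         mid = solve(stack, k-1)
--         stack.append(temp)
--         return mid
-- ===== SOURCE B (Python) =====
-- def solve(stack, k):
--     n = len(stack)
--     if not (1 <= k <= n):
--         raise IndexError("pop index out of range")
--     return stack.pop(n - k)
-- ===== Notes on version B (the rewrite author's own statement) =====
-- stated objective: simpler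
-- what changed: Replaces the k-deep recursion (pop, recurse, re-append) with a direct bounds check and a single pop at index len(stack)-k.
import Mathlib
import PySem

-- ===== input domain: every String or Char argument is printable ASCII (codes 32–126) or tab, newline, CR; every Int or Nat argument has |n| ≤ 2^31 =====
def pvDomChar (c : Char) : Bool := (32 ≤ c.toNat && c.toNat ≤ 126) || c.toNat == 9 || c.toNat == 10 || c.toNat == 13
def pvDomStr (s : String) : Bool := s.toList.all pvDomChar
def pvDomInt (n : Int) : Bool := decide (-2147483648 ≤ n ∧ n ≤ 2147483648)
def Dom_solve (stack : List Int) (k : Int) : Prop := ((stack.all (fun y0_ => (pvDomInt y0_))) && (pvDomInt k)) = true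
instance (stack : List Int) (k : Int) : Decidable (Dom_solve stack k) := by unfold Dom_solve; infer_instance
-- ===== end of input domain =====

-- B replaces A's k-deep recursion by one guarded pop at the computed index; both mutate the
-- caller's list identically (they remove the same element), the theorems are about the return value.

-- ===== PORT A =====
def solve (stack : List Int) (k : Int) : Int :=
  if k = 1 then
    -- delted_ele = stack[len(stack)-1]; stack.pop(); return delted_ele
    (PySem.List.pyGet? stack ((stack.length : Int) - 1)).getD 0
  else
    -- temp = stack.pop(); mid = solve(stack, k-1); stack.append(temp); return mid
    if _h : stack = [] then 0  -- Python raises IndexError here; excluded by Pre_solve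
    else solve stack.dropLast (k - 1)
termination_by stack.length
decreasing_by
  have : stack.length ≠ 0 := fun hl => _h (List.eq_nil_of_length_eq_zero hl)
  simp [List.length_dropLast]; omega

-- ===== PORT B =====
def solve_alt (stack : List Int) (k : Int) : Int :=
  if 1 ≤ k ∧ k ≤ (stack.length : Int) then
    (PySem.List.pyGet? stack ((stack.length : Int) - k)).getD 0
  else 0  -- Python raises IndexError here; excluded by Pre_solve

-- ===== PRECONDITION & SPEC =====
-- A raises IndexError when k < 1 (recursion empties the stack) or k > len(stack); B raises there too.
def Pre_solve (stack : List Int) (k : Int) : Prop := 1 ≤ k ∧ k ≤ (stack.length : Int)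
instance (stack : List Int) (k : Int) : Decidable (Pre_solve stack k) := by unfold Pre_solve; infer_instance
def pvWitness_solve : List Int × Int := ([3, 1, 4, 1, 5], 2)
def Spec_solve (stack : List Int) (k : Int) (out : Int) : Prop := out = solve_alt stack k
instance (stack : List Int) (k : Int) (out : Int) : Decidable (Spec_solve stack k out) := by unfold Spec_solve; infer_instance

-- ===== CLAIM (what is proved, stated in full; the proofs are below) =====
def Claim_equal_solve : Prop := ∀ (stack : List Int) (k : Int), Dom_solve stack k → Pre_solve stack k → Spec_solve stack k (solve stack k)

-- ===== LEMMAS AND PROOFS =====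

theorem solve_eq_get (stack : List Int) (k : Int)
    (h1 : 1 ≤ k) (h2 : k ≤ (stack.length : Int)) :
    solve stack k = (PySem.List.pyGet? stack ((stack.length : Int) - k)).getD 0 := by
  induction stack using List.reverseRecOn generalizing k with
  | nil => simp at h2; omega
  | append_singleton xs x ih =>
    rw [solve]
    by_cases hk : k = 1
    · simp [hk]
    · have hne : xs ++ [x] ≠ [] := by simp
      have hlen : ((xs ++ [x]).length : Int) = (xs.length : Int) + 1 := by
        simp
      rw [if_neg hk, dif_neg hne, List.dropLast_concat]
      have h1' : 1 ≤ k - 1 := by omega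
      have h2' : k - 1 ≤ (xs.length : Int) := by omega
      rw [ih (k - 1) h1' h2']
      have hidx : (xs.length : Int) - (k - 1) = ((xs ++ [x]).length : Int) - k := by
        simp; omega
      rw [hidx]
      -- the index is nonnegative and strictly below xs.length, so appending [x] is invisible
      have hnn : 0 ≤ ((xs ++ [x]).length : Int) - k := by
        simp at h2 ⊢; omega
      rw [PySem.List.pyGet?_of_nonneg _ (by rw [← hidx]; omega),
          PySem.List.pyGet?_of_nonneg _ hnn]
      have hlt : (((xs ++ [x]).length : Int) - k).toNat < xs.length := by
        simp at h2 ⊢; omega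
      rw [List.getElem?_append_left hlt]

-- ===== VERDICT (by name: the statement is the Claim_ definition above) =====
theorem solve_spec : Claim_equal_solve := by
  intro stack k _ hpre
  obtain ⟨h1, h2⟩ := hpre
  show solve stack k = solve_alt stack k
  rw [solve_alt, if_pos ⟨h1, h2⟩, solve_eq_get stack k h1 h2]
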